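-- pv_equiv track=rewrite | github.com/17b01a0534/Wise_Elite | 17B01A0534/Manasa_and_factorials.py | least_expo_5
-- ===== SOURCE A (Python) =====
-- def least_expo_5(n) :
--     count = 0
--     Sum = 0
--     while True :
--         Sum = Sum + int(pow(5, count))
--         if Sum == n :
--             return count + 1
--         elif Sum > n :
--             return count
--         else :
--             count += 1
-- ===== SOURCE B (Python) =====
-- def least_expo_5(n):
--     # Threshold form: S(e) >= n  <=>  5**(e+1) >= 4*n + 1; track one power instead of the running sum.
--     T = 4 * n + 1
--     e, p = 1, 5
--     while p < T:
--         e += 1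
--         p *= 5
--     return e if p == T else e - 1
-- ===== Notes on version B (the rewrite author's own statement) =====
-- stated objective: alternative
-- what changed: Instead of accumulating the running sum of powers of five and three-way comparing it with n, B uses the geometric-series identity to track a single power of five against a linearly transformed threshold.
import Mathlib
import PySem

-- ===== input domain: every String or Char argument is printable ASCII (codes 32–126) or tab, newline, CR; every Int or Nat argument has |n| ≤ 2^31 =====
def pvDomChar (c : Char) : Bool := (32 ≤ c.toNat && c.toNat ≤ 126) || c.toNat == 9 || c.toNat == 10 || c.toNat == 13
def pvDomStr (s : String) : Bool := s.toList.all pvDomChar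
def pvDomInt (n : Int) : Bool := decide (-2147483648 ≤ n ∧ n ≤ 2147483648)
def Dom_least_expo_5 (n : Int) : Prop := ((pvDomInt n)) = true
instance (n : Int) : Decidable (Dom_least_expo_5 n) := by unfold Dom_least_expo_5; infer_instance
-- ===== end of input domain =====

-- B replaces A's running-sum accumulator by a single power compared with the threshold 4*n+1 (alternative decomposition, same cost).
-- ===== PORT A =====
-- while-True loop of A: state (count, Sum); terminates because Sum strictly increases while Sum + 5^count < n
def leA (n : Int) (count : Nat) (Sum : Int) : Int :=
  let S := Sum + 5 ^ count
  if S = n then (count : Int) + 1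
  else if S > n then (count : Int)
  else leA n (count + 1) S
termination_by (n - Sum).toNat
decreasing_by
  have h5 : (0:Int) < 5 ^ count := pow_pos (by norm_num) count
  simp only [S] at *
  omega

def least_expo_5 (n : Int) : Int := leA n 0 0

-- ===== PORT B =====
-- while p < T loop of B: state (e, p); the `1 ≤ p` conjunct is a totality guard only (p is always a positive power of 5)
def leB (T e p : Int) : Int :=
  if h : p < T ∧ 1 ≤ p then leB T (e + 1) (p * 5)
  else if p = T then e else e - 1
termination_by (T - p).toNat
decreasing_by omega

def least_expo_5_alt (n : Int) : Int := leB (4 * n + 1) 1 5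

-- ===== PRECONDITION & SPEC =====
def Spec_least_expo_5 (n : Int) (out : Int) : Prop := out = least_expo_5_alt n
instance (n : Int) (out : Int) : Decidable (Spec_least_expo_5 n out) := by unfold Spec_least_expo_5; infer_instance

-- ===== CLAIM (what is proved, stated in full; the proofs are below) =====
def Claim_equal_least_expo_5 : Prop := ∀ (n : Int), Dom_least_expo_5 n → Spec_least_expo_5 n (least_expo_5 n)

-- ===== LEMMAS AND PROOFS =====

-- ===== VERDICT (by name: the statement is the Claim_ definition above) =====
lemma leA_eq_leB (n : Int) (k : Nat) (Sum : Int) (hinv : 4 * Sum + 1 = 5 ^ k) :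
    leA n k Sum = leB (4 * n + 1) ((k : Int) + 1) (5 ^ (k + 1)) := by
  induction k, Sum using leA.induct n with
  | case1 k Sum S hS =>
    have hp : (5:Int) ^ (k + 1) = 4 * n + 1 := by
      have : (5:Int) ^ (k+1) = 5 * 5 ^ k := pow_succ' 5 k
      simp only [S] at hS; omega
    rw [leA]; simp only [S, hS]
    rw [leB]; simp [hp]
  | case2 k Sum S hne hgt =>
    have h5 : (5:Int) ^ (k+1) = 5 * 5 ^ k := pow_succ' 5 k
    have hp : (5:Int) ^ (k + 1) > 4 * n + 1 := by simp only [S] at hne hgt; omega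
    rw [leA]; simp only [S] at *
    rw [if_neg hne, if_pos hgt]
    rw [leB]
    rw [dif_neg (by omega)]
    rw [if_neg (by omega)]
    omega
  | case3 k Sum S hne hle ih =>
    have h5 : (5:Int) ^ (k+1) = 5 * 5 ^ k := pow_succ' 5 k
    have hpos : (0:Int) < 5 ^ (k+1) := pow_pos (by norm_num) _
    have hp : (5:Int) ^ (k + 1) < 4 * n + 1 := by simp only [S] at hne hle; omega
    rw [leA]; simp only [S] at *
    rw [if_neg hne, if_neg (by omega)]
    rw [leB, dif_pos ⟨hp, by omega⟩]
    have := ih (by omega)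
    rw [this]
    have : (5:Int) ^ (k+1) * 5 = 5 ^ (k+2) := by ring
    rw [this]
    norm_cast

-- ===== VERDICT =====
theorem least_expo_5_spec : Claim_equal_least_expo_5 := by
  intro n _
  unfold Spec_least_expo_5 least_expo_5 least_expo_5_alt
  have := leA_eq_leB n 0 0 (by norm_num)
  simpa using this
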